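-- pv_equiv track=rewrite | github.com/loociano/advent-of-code | aoc2020/src/day20/solution.py | _count_matching_borders
-- ===== SOURCE A (Python) =====
-- from typing import List, Tuple, Union
--
-- def _count_matching_borders(borders: Tuple[str, str, str, str],
--                             other_borders: Tuple[str, str, str, str]) -> int:
--   matching_borders = 0
--   for border in borders:
--     for other_border in other_borders:
--       if border == other_border:
--         matching_borders += 1
--   return matching_borders
-- ===== SOURCE B (Python) =====
-- def _count_matching_borders(borders, other_borders):
--   first = {}
--   for border in borders:
--     first[border] = first.get(border, 0) + 1
--   second = {}
--   for border in other_borders: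
--     second[border] = second.get(border, 0) + 1
--   return sum(count * second.get(border, 0) for border, count in first.items())
-- ===== Notes on version B (the rewrite author's own statement) =====
-- stated objective: alternative
-- what changed: Replaces the 4x4 nested pairwise scan with two hand-built frequency tables (dicts) combined in one pass over the distinct borders, multiplying the two counts.
import Mathlib
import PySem

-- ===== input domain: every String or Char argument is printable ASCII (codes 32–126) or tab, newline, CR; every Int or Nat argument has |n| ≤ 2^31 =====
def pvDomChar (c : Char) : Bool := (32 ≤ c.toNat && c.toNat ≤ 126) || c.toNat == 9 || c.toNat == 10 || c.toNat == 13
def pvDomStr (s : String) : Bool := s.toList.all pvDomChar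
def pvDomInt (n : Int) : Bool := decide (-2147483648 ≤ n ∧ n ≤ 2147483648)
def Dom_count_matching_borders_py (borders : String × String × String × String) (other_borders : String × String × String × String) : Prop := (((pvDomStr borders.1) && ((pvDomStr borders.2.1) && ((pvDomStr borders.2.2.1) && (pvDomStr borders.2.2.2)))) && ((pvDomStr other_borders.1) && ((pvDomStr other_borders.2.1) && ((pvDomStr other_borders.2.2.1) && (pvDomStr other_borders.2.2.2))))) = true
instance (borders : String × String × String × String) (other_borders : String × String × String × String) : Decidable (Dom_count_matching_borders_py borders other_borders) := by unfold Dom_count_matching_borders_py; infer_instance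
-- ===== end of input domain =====

-- B replaces A's nested pairwise scan with two frequency tables combined in one
-- pass over the distinct borders (alternative decomposition, same cost).

-- ===== PORT A =====
-- A: nested for-loops over the two 4-tuples, incrementing on equality.
def count_matching_borders_py (borders : String × String × String × String) (other_borders : String × String × String × String) : Int :=
  let bs := [borders.1, borders.2.1, borders.2.2.1, borders.2.2.2]
  let os := [other_borders.1, other_borders.2.1, other_borders.2.2.1, other_borders.2.2.2]
  bs.foldl (fun acc border =>
    os.foldl (fun acc other_border =>
      if border == other_border then acc + 1 else acc) acc) 0

-- ===== PORT B =====
-- B: build the two frequency dicts, then sum count * second.get(border, 0) over first.items().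
def count_matching_borders_py_alt (borders : String × String × String × String) (other_borders : String × String × String × String) : Int :=
  let bs := [borders.1, borders.2.1, borders.2.2.1, borders.2.2.2]
  let os := [other_borders.1, other_borders.2.1, other_borders.2.2.1, other_borders.2.2.2]
  let first : PySem.Dict String Int := bs.foldl (fun d b => d.insert b (d.getD b 0 + 1)) PySem.Dict.empty
  let second : PySem.Dict String Int := os.foldl (fun d b => d.insert b (d.getD b 0 + 1)) PySem.Dict.empty
  first.items.foldl (fun acc p => acc + p.2 * second.getD p.1 0) 0

-- ===== PRECONDITION & SPEC =====
def Spec_count_matching_borders_py (borders : String × String × String × String) (other_borders : String × String × String × String) (out : Int) : Prop := out = count_matching_borders_py_alt borders other_borders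
instance (borders : String × String × String × String) (other_borders : String × String × String × String) (out : Int) : Decidable (Spec_count_matching_borders_py borders other_borders out) := by unfold Spec_count_matching_borders_py; infer_instance

-- ===== CLAIM (what is proved, stated in full; the proofs are below) =====
def Claim_equal_count_matching_borders_py : Prop := ∀ (borders : String × String × String × String) (other_borders : String × String × String × String), Dom_count_matching_borders_py borders other_borders → Spec_count_matching_borders_py borders other_borders (count_matching_borders_py borders other_borders)

-- ===== LEMMAS AND PROOFS =====
lemma pv_group_sum (xs : List String) (f : String → Int) :
    ((PySem.Set.ofList xs).map (fun k => (xs.count k : Int) * f k)).sum = (xs.map f).sum := by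
  have hnd : (PySem.Set.ofList xs).Nodup := PySem.Set.nodup_ofList xs
  have htf : (PySem.Set.ofList xs).toFinset = xs.toFinset := by
    ext k; simp [PySem.Set.mem_ofList]
  rw [← List.sum_toFinset _ hnd, htf, Finset.sum_list_map_count]
  simp

lemma pv_core (xs ys : List String) :
    xs.foldl (fun acc b => ys.foldl (fun acc o => if b == o then acc + 1 else acc) acc) 0
      = (xs.foldl (fun d b => d.insert b (d.getD b 0 + 1)) (PySem.Dict.empty : PySem.Dict String Int)).items.foldl
          (fun acc p => acc + p.2 * (ys.foldl (fun d b => d.insert b (d.getD b 0 + 1)) (PySem.Dict.empty : PySem.Dict String Int)).getD p.1 0) 0 := by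
  rw [PySem.List.foldl_congr_mem xs _ (fun acc b => acc + ((ys.count b : Nat) : Int)) 0
      (fun acc b _ => by
        rw [PySem.List.foldl_congr_mem ys _ (fun a o => if o == b then a + 1 else a) acc
            (fun a o _ => by simp [BEq.comm])]
        exact PySem.List.foldl_beq_add_one ys b acc)]
  rw [PySem.List.foldl_add, PySem.Dict.foldl_insert_getD_add_one_eq_counter,
      PySem.Dict.foldl_insert_getD_add_one_eq_counter, PySem.Dict.items_counter,
      PySem.List.foldl_add, List.map_map]
  simp only [Function.comp_def, PySem.Dict.getD_counter]
  rw [pv_group_sum xs (fun k => ((ys.count k : Nat) : Int))]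

-- ===== VERDICT (by name: the statement is the Claim_ definition above) =====
theorem count_matching_borders_py_spec : Claim_equal_count_matching_borders_py := by
  intro b o _
  unfold Spec_count_matching_borders_py count_matching_borders_py count_matching_borders_py_alt
  exact pv_core _ _
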